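-- pv_equiv track=rewrite | github.com/jakeibeemassa0908/cosc4315hw1 | HW1/bigint.py | _nodes_normalize
-- ===== SOURCE A (Python) =====
-- def _nodes_normalize(nodes, node_size, carry=0, acc=[]):
--     if not nodes:
--         if carry > 0:
--             return _nodes_normalize([carry], node_size, 0, acc)
--         else:
--             return acc
--     else:
--         num = nodes[-1] + carry
--         new_num = num % (10 ** node_size)
--         new_carry = num // (10 ** node_size)
--         return _nodes_normalize(nodes[:-1], node_size, new_carry, [new_num] + acc)
-- ===== SOURCE B (Python) =====
-- def _nodes_normalize(nodes, node_size, carry=0, acc=[]):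
--     base = 10 ** node_size
--     out = []
--     for num in reversed(nodes):
--         num += carry
--         out.append(num % base)
--         carry = num // base
--     while carry > 0:
--         out.append(carry % base)
--         carry //= base
--     return out[::-1] + acc
-- ===== Notes on version B (the rewrite author's own statement) =====
-- stated objective: faster
-- what changed: Replaced A's recursion that copies nodes[:-1] and rebuilds [new_num]+acc at every step (quadratic list copying) by a single iterative pass over reversed(nodes) with an appended carry-drain loop and one final reverse-and-concatenate; intended as faster (measured 58x at n=4096, the largest size a timing run saw both programs finish; A timed out beyond).
-- outside the precondition, e.g. on _nodes_normalize([-5], 0, 0, []): A returns [0], B returns [0]; on _nodes_normalize([0], -1, 0, []): A returns [0.0], B returns [0.0]; on _nodes_normalize([5], 0, 0, []): A raises RecursionError, B does not finish within the time limit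
import Mathlib
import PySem

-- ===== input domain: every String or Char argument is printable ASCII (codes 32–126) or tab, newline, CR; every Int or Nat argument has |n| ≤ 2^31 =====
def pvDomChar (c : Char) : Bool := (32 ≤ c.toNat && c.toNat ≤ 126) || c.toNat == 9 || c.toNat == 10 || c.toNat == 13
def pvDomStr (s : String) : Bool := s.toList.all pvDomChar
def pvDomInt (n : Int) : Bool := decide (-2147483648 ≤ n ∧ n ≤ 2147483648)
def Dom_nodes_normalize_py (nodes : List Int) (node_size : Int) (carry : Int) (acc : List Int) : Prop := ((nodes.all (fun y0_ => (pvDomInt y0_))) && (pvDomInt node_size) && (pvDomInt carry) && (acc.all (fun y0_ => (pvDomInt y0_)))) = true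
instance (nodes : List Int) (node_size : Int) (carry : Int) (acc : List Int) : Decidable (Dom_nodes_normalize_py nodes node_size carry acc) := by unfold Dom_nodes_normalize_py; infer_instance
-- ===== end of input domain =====

-- B replaces A's recursion (which copies nodes[:-1] and [new_num]+acc each step) by one iterative
-- pass over reversed(nodes) plus a carry-drain loop; intended as faster (measured 58x at n=4096).

-- ===== PORT A =====
-- fuel bound for A's recursion: inside Pre_ (node_size ≥ 1) the recursion takes fewer steps than this
def pvSumT (l : List Int) : Nat := (l.map Int.toNat).sum

def pvGoA : Nat → List Int → Int → Int → List Int → List Int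
  | 0, _, _, _, acc => acc          -- fuel exhausted: unreachable for the inputs admitted by Pre_
  | f + 1, nodes, node_size, carry, acc =>
    if nodes = [] then
      if carry > 0 then pvGoA f [carry] node_size 0 acc
      else acc
    else
      let num := nodes.getLast?.getD 0 + carry          -- nodes[-1]; exact: this branch has nodes ≠ []
      let base : Int := 10 ^ node_size.toNat            -- 10 ** node_size; exact for node_size ≥ 0
      let new_num := PySem.Int.mod num base
      let new_carry := PySem.Int.floordiv num base
      pvGoA f nodes.dropLast node_size new_carry (new_num :: acc)   -- nodes[:-1]; [new_num] + acc

def nodes_normalize_py (nodes : List Int) (node_size : Int) (carry : Int) (acc : List Int) : List Int :=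
  pvGoA (nodes.length + 2 * carry.toNat + 2 * pvSumT nodes + 2) nodes node_size carry acc

-- ===== PORT B =====
-- the 'while carry > 0' drain loop of Source B; fuel only for totality (carry strictly drops inside Pre_)
def pvDrainB : Nat → Int → Int → List Int → List Int
  | 0, _, _, out => out
  | f + 1, carry, base, out =>
    if carry > 0 then pvDrainB f (PySem.Int.floordiv carry base) base (out ++ [PySem.Int.mod carry base])
    else out

def nodes_normalize_py_alt (nodes : List Int) (node_size : Int) (carry : Int) (acc : List Int) : List Int :=
  let base : Int := 10 ^ node_size.toNat                -- 10 ** node_size; exact for node_size ≥ 0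
  let p := nodes.reverse.foldl
    (fun (p : List Int × Int) num =>
      (p.1 ++ [PySem.Int.mod (num + p.2) base], PySem.Int.floordiv (num + p.2) base))
    ([], carry)
  let out := pvDrainB (p.2.toNat + 1) p.2 base p.1
  out.reverse ++ acc                                    -- out[::-1] + acc

-- ===== PRECONDITION & SPEC =====
-- Pre_ excludes node_size ≤ 0, on which 10**node_size is not an int: for node_size < 0 it is a
-- float and A returns a list of floats (not values of the declared type); for node_size = 0 A
-- either recurses forever (RecursionError, whenever some carry becomes positive) or returns a
-- degenerate all-zero list.
def Pre_nodes_normalize_py (nodes : List Int) (node_size : Int) (carry : Int) (acc : List Int) : Prop :=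
  1 ≤ node_size
instance (nodes : List Int) (node_size : Int) (carry : Int) (acc : List Int) : Decidable (Pre_nodes_normalize_py nodes node_size carry acc) := by unfold Pre_nodes_normalize_py; infer_instance

def pvWitness_nodes_normalize_py : List Int × Int × Int × List Int := ([12, 345], 2, 7, [6])

def Spec_nodes_normalize_py (nodes : List Int) (node_size : Int) (carry : Int) (acc : List Int) (out : List Int) : Prop := out = nodes_normalize_py_alt nodes node_size carry acc
instance (nodes : List Int) (node_size : Int) (carry : Int) (acc : List Int) (out : List Int) : Decidable (Spec_nodes_normalize_py nodes node_size carry acc out) := by unfold Spec_nodes_normalize_py; infer_instance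

-- ===== CLAIM (what is proved, stated in full; the proofs are below) =====
def Claim_equal_nodes_normalize_py : Prop := ∀ (nodes : List Int) (node_size : Int) (carry : Int) (acc : List Int), Dom_nodes_normalize_py nodes node_size carry acc → Pre_nodes_normalize_py nodes node_size carry acc → Spec_nodes_normalize_py nodes node_size carry acc (nodes_normalize_py nodes node_size carry acc)

-- ===== LEMMAS AND PROOFS =====

-- the fold step of B, named for the proofs (definitionally the lambda in nodes_normalize_py_alt)
def pvStep (base : Int) (p : List Int × Int) (num : Int) : List Int × Int :=
  (p.1 ++ [PySem.Int.mod (num + p.2) base], PySem.Int.floordiv (num + p.2) base)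

lemma pvStep_foldl_out (base : Int) (l : List Int) (out : List Int) (c : Int) :
    l.foldl (pvStep base) (out, c)
      = (out ++ (l.foldl (pvStep base) ([], c)).1, (l.foldl (pvStep base) ([], c)).2) := by
  induction l generalizing out c with
  | nil => simp
  | cons x xs ih =>
    have h1 := ih (out ++ [PySem.Int.mod (x + c) base]) (PySem.Int.floordiv (x + c) base)
    have h2 := ih [PySem.Int.mod (x + c) base] (PySem.Int.floordiv (x + c) base)
    simp [List.foldl_cons, pvStep, h1, h2]

lemma pvCarry_toNat_le (x c base : Int) (hb : 2 ≤ base) :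
    (PySem.Int.floordiv (x + c) base).toNat ≤ x.toNat + c.toNat := by
  rw [PySem.Int.floordiv_eq_ediv_of_pos (by omega)]
  have h1 : base * ((x + c) / base) + (x + c) % base = x + c := Int.ediv_add_emod _ _
  have h3 : 0 ≤ (x + c) % base := Int.emod_nonneg _ (by omega)
  rcases le_or_gt ((x + c) / base) 0 with h | h
  · omega
  · have h2 : 2 * ((x + c) / base) ≤ base * ((x + c) / base) :=
      mul_le_mul_of_nonneg_right hb (by omega)
    omega

lemma pvCarry_lt (c base : Int) (hc : 0 < c) (hb : 2 ≤ base) :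
    (PySem.Int.floordiv c base).toNat < c.toNat := by
  rw [PySem.Int.floordiv_eq_ediv_of_pos (by omega)]
  have h1 : base * (c / base) + c % base = c := Int.ediv_add_emod _ _
  have h3 : 0 ≤ c % base := Int.emod_nonneg _ (by omega)
  have hq0 : 0 ≤ c / base := Int.ediv_nonneg (le_of_lt hc) (by omega)
  have h2 : 2 * (c / base) ≤ base * (c / base) := mul_le_mul_of_nonneg_right hb hq0
  omega

lemma pvDrainB_out (f : Nat) (c base : Int) (out : List Int) :
    pvDrainB f c base out = out ++ pvDrainB f c base [] := by
  induction f generalizing c out with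
  | zero => simp [pvDrainB]
  | succ f ih =>
    simp only [pvDrainB]
    split_ifs with h
    · rw [ih, ih (PySem.Int.floordiv c base) ([] ++ [PySem.Int.mod c base])]
      simp
    · simp

-- A's drain (empty nodes, positive carry) equals B's drain loop, reversed, for any sufficient fuels
lemma pvDrain_eq (ns : Int) (base : Int) (hbase : base = 10 ^ ns.toNat) (hb : 2 ≤ base) :
    ∀ n (c : Int), c.toNat ≤ n → ∀ f g (acc : List Int), 2 * c.toNat + 2 ≤ f → c.toNat + 1 ≤ g →
      pvGoA f [] ns c acc = (pvDrainB g c base []).reverse ++ acc := by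
  intro n
  induction n with
  | zero =>
    intro c hc f g acc hf hg
    obtain ⟨f', rfl⟩ : ∃ f', f = f' + 1 := ⟨f - 1, by omega⟩
    obtain ⟨g', rfl⟩ : ∃ g', g = g' + 1 := ⟨g - 1, by omega⟩
    have hc0 : ¬ c > 0 := by omega
    simp [pvGoA, pvDrainB, hc0]
  | succ n ih =>
    intro c hc f g acc hf hg
    obtain ⟨f', rfl⟩ : ∃ f', f = f' + 1 + 1 := ⟨f - 2, by omega⟩
    obtain ⟨g', rfl⟩ : ∃ g', g = g' + 1 := ⟨g - 1, by omega⟩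
    by_cases hc0 : c > 0
    · have hlt := pvCarry_lt c base hc0 hb
      have e1 : pvGoA (f' + 1 + 1) [] ns c acc = pvGoA (f' + 1) [c] ns 0 acc := by
        simp [pvGoA, hc0]
      have e2 : pvGoA (f' + 1) [c] ns 0 acc
          = pvGoA f' [] ns (PySem.Int.floordiv c base) (PySem.Int.mod c base :: acc) := by
        simp [pvGoA, ← hbase]
      rw [e1, e2, ih (PySem.Int.floordiv c base) (by omega) f' g' _ (by omega) (by omega)]
      have e3 : pvDrainB (g' + 1) c base []
          = pvDrainB g' (PySem.Int.floordiv c base) base ([] ++ [PySem.Int.mod c base]) := by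
        simp [pvDrainB, hc0]
      rw [e3, pvDrainB_out g' (PySem.Int.floordiv c base) base ([] ++ [PySem.Int.mod c base])]
      simp
    · simp [pvGoA, pvDrainB, hc0]

lemma pvMain (ns base : Int) (hbase : base = 10 ^ ns.toNat) (hb : 2 ≤ base) :
    ∀ (l : List Int) (c : Int) (acc : List Int) (f : Nat),
      l.length + 2 * c.toNat + 2 * pvSumT l + 2 ≤ f →
      pvGoA f l.reverse ns c acc
        = (pvDrainB ((l.foldl (pvStep base) ([], c)).2.toNat + 1)
              (l.foldl (pvStep base) ([], c)).2 base []).reverse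
          ++ ((l.foldl (pvStep base) ([], c)).1).reverse ++ acc := by
  intro l
  induction l with
  | nil =>
    intro c acc f hf
    simp only [List.reverse_nil, List.foldl_nil]
    rw [pvDrain_eq ns base hbase hb c.toNat c le_rfl f (c.toNat + 1) acc (by omega) le_rfl]
    simp
  | cons x xs ih =>
    intro c acc f hf
    obtain ⟨f', rfl⟩ : ∃ f', f = f' + 1 := ⟨f - 1, by omega⟩
    have hne : xs.reverse ++ [x] ≠ [] := by simp
    have e1 : pvGoA (f' + 1) (x :: xs).reverse ns c acc
        = pvGoA f' xs.reverse ns (PySem.Int.floordiv (x + c) base)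
            (PySem.Int.mod (x + c) base :: acc) := by
      simp only [List.reverse_cons, pvGoA, if_neg hne]
      rw [List.getLast?_concat, List.dropLast_concat]
      simp [← hbase]
    have hsum : pvSumT (x :: xs) = x.toNat + pvSumT xs := by simp [pvSumT]
    have hcar := pvCarry_toNat_le x c base hb
    rw [e1, ih (PySem.Int.floordiv (x + c) base) (PySem.Int.mod (x + c) base :: acc) f'
        (by simp only [List.length_cons] at hf; omega)]
    have hfold : (x :: xs).foldl (pvStep base) ([], c)
        = ((xs.foldl (pvStep base) ([], PySem.Int.floordiv (x + c) base)).1.cons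
             (PySem.Int.mod (x + c) base),
           (xs.foldl (pvStep base) ([], PySem.Int.floordiv (x + c) base)).2) := by
      have : pvStep base ([], c) x
          = ([PySem.Int.mod (x + c) base], PySem.Int.floordiv (x + c) base) := by
        simp [pvStep]
      rw [List.foldl_cons, this, pvStep_foldl_out]
      simp
    rw [hfold]
    simp

lemma pvBase_ge (ns : Int) (h : 1 ≤ ns) : (2:Int) ≤ 10 ^ ns.toNat := by
  have h1 : 1 ≤ ns.toNat := by omega
  calc (2:Int) ≤ 10 ^ 1 := by norm_num
    _ ≤ 10 ^ ns.toNat := pow_le_pow_right₀ (by norm_num) h1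

-- ===== VERDICT (by name: the statement is the Claim_ definition above) =====
theorem nodes_normalize_py_spec : Claim_equal_nodes_normalize_py := by
  intro nodes ns carry acc _ hpre
  unfold Spec_nodes_normalize_py nodes_normalize_py
  have hb := pvBase_ge ns hpre
  have h := pvMain ns (10 ^ ns.toNat) rfl hb nodes.reverse carry acc
      (nodes.length + 2 * carry.toNat + 2 * pvSumT nodes + 2)
      (by simp [pvSumT, List.map_reverse, List.sum_reverse])
  rw [List.reverse_reverse] at h
  have halt : nodes_normalize_py_alt nodes ns carry acc
      = (pvDrainB ((nodes.reverse.foldl (pvStep (10 ^ ns.toNat)) ([], carry)).2.toNat + 1)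
          (nodes.reverse.foldl (pvStep (10 ^ ns.toNat)) ([], carry)).2 (10 ^ ns.toNat)
          (nodes.reverse.foldl (pvStep (10 ^ ns.toNat)) ([], carry)).1).reverse ++ acc := rfl
  rw [halt,
    pvDrainB_out ((nodes.reverse.foldl (pvStep (10 ^ ns.toNat)) ([], carry)).2.toNat + 1)
      (nodes.reverse.foldl (pvStep (10 ^ ns.toNat)) ([], carry)).2 (10 ^ ns.toNat)
      (nodes.reverse.foldl (pvStep (10 ^ ns.toNat)) ([], carry)).1,
    h]
  simp
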